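-- pv_equiv track=rewrite | github.com/johnw42/mgit | test/.mgit/default.merge/bin/python/jrw/path.py | PruneSubdirectories
-- ===== SOURCE A (Python) =====
-- def PruneSubdirectories(dir_paths):
--   split_dir_paths = {tuple(p.split('/')): p for p in dir_paths}
--   result_set = set()
--   for key, value in split_dir_paths.items():
--     omit_from_result = False
--     for parent_key_len in range(1, len(key)):
--       parent_key = key[:parent_key_len]
--       if parent_key in split_dir_paths:
--         omit_from_result = True
--         break
--     if not omit_from_result:
--       result_set.add(value)
--   return sorted(result_set)
-- ===== SOURCE B (Python) =====
-- def PruneSubdirectories(dir_paths):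
--   tuples = sorted({tuple(p.split('/')) for p in dir_paths})
--   kept = []
--   last = None
--   for t in tuples:
--     if last is not None and len(t) > len(last) and t[:len(last)] == last:
--       continue
--     kept.append('/'.join(t))
--     last = t
--   return sorted(kept)
-- ===== Notes on version B (the rewrite author's own statement) =====
-- stated objective: alternative
-- what changed: Replaces the dict of split tuples with a per-path scan over all prefix lengths by sorting the distinct component tuples once (ancestors sort before descendants) and keeping a path in a single linear pass exactly when it is not a descendant of the last kept tuple.
import Mathlib
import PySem

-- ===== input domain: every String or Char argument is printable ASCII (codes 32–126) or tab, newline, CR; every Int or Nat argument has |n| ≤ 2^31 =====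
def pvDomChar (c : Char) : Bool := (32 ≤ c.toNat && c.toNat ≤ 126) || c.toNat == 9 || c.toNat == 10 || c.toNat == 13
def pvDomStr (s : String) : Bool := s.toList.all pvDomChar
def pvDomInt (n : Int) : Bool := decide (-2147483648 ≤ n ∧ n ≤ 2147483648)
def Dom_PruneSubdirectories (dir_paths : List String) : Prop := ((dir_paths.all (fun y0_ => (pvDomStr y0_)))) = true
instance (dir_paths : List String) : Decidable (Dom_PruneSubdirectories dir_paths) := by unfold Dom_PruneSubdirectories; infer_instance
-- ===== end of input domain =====

-- B replaces A's per-path scan over every prefix length against a dict of split tuples by one sort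
-- of the distinct component tuples followed by a single linear pass keeping non-descendants (objective: alternative).

-- p.split('/')  (sep "/" is nonempty, so split? never returns none)
def pvSplit (p : String) : List String := (PySem.Str.split? p "/").getD []
-- '/'.join(t)
def pvJoin (t : List String) : String := PySem.Str.join "/" t

-- ===== PORT A =====
-- {tuple(p.split('/')): p for p in dir_paths}
def pvDictA (dir_paths : List String) : PySem.Dict (List String) String :=
  dir_paths.foldl (fun d p => d.insert (pvSplit p) p) PySem.Dict.empty

-- inner 'for parent_key_len in range(1, len(key)): if key[:parent_key_len] in split_dir_paths: ... break' = any
def pvOmit (d : PySem.Dict (List String) String) (key : List String) : Bool :=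
  (PySem.List.pyRange 1 (key.length : Int) 1).any
    (fun i => d.contains (PySem.List.slice key none (some i)))

def PruneSubdirectories (dir_paths : List String) : List String :=
  let split_dir_paths := pvDictA dir_paths
  let result_set : PySem.Set String :=
    split_dir_paths.items.foldl (fun rs kv =>
      if pvOmit split_dir_paths kv.1 then rs else PySem.Set.add rs kv.2) PySem.Set.empty
  PySem.List.sorted result_set (fun x => x)

-- ===== PORT B =====
-- loop body: skip t when it is a descendant of the last kept tuple, else keep it
-- (t[:len(last)] == last is t.take last.length = last: slice with a nonnegative natural bound)
def pvStep (st : List String × Option (List String)) (t : List String) :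
    List String × Option (List String) :=
  match st.2 with
  | some l =>
    if l.length < t.length ∧ t.take l.length = l then st
    else (st.1 ++ [pvJoin t], some t)
  | none => (st.1 ++ [pvJoin t], some t)

def PruneSubdirectories_alt (dir_paths : List String) : List String :=
  let tuples : List (List String) :=
    PySem.List.sorted (PySem.Set.ofList (dir_paths.map pvSplit)) (fun x => x)
  let scan := tuples.foldl pvStep ([], none)
  PySem.List.sorted scan.1 (fun x => x)

-- ===== PRECONDITION & SPEC =====
def Spec_PruneSubdirectories (dir_paths : List String) (out : List String) : Prop := out = PruneSubdirectories_alt dir_paths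
instance (dir_paths : List String) (out : List String) : Decidable (Spec_PruneSubdirectories dir_paths out) := by unfold Spec_PruneSubdirectories; infer_instance

-- ===== CLAIM (what is proved, stated in full; the proofs are below) =====
def Claim_equal_PruneSubdirectories : Prop := ∀ (dir_paths : List String), Dom_PruneSubdirectories dir_paths → Spec_PruneSubdirectories dir_paths (PruneSubdirectories dir_paths)

-- ===== LEMMAS AND PROOFS =====

-- s is a strict ancestor (proper component prefix) of t
def pvIsAnc (s t : List String) : Prop := s.length < t.length ∧ t.take s.length = s

theorem pvIsAnc_iff_prefix (s t : List String) : pvIsAnc s t ↔ s <+: t ∧ s.length < t.length := by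
  unfold pvIsAnc
  constructor
  · rintro ⟨h1, h2⟩
    exact ⟨List.prefix_iff_eq_take.mpr h2.symm, h1⟩
  · rintro ⟨h1, h2⟩
    exact ⟨h2, (List.prefix_iff_eq_take.mp h1).symm⟩

theorem pvIsAnc_trans {s u t : List String} (h1 : pvIsAnc s u) (h2 : pvIsAnc u t) : pvIsAnc s t := by
  rw [pvIsAnc_iff_prefix] at *
  exact ⟨h1.1.trans h2.1, h1.2.trans h2.2⟩

theorem pvLt_append {s r : List String} (hr : r ≠ []) : s < s ++ r := by
  induction s with
  | nil =>
    cases r with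
    | nil => exact absurd rfl hr
    | cons a l => exact List.nil_lt_cons a l
  | cons a s ih => exact List.cons_lt_cons_iff.mpr (Or.inr ⟨rfl, ih⟩)

theorem pvLt_of_isAnc {s t : List String} (h : pvIsAnc s t) : s < t := by
  rw [pvIsAnc_iff_prefix] at h
  obtain ⟨⟨r, hr⟩, hlen⟩ := h
  subst hr
  apply pvLt_append
  intro hnil
  simp [hnil] at hlen

theorem pvInterval {s u t : List String} (h : pvIsAnc s t) (h1 : s < u) (h2 : u < t) : s <+: u := by
  induction s generalizing u t with
  | nil => exact List.nil_prefix
  | cons a s ih =>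
    rw [pvIsAnc_iff_prefix] at h
    obtain ⟨hpre, hlen⟩ := h
    cases t with
    | nil => simp at hlen
    | cons b t =>
      obtain ⟨hab, hpre'⟩ := List.cons_prefix_cons.mp hpre
      subst hab
      cases u with
      | nil => exact absurd h1 (List.not_lt_nil _)
      | cons c u =>
        rcases List.cons_lt_cons_iff.mp h1 with hac | ⟨hac, hsu⟩
        · rcases List.cons_lt_cons_iff.mp h2 with hca | ⟨hca, hut⟩
          · exact absurd hca (lt_asymm hac)
          · exact absurd hac (by rw [hca] at hac ⊢; exact absurd hac (lt_irrefl _))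
        · subst hac
          rcases List.cons_lt_cons_iff.mp h2 with haa | ⟨_, hut⟩
          · exact absurd haa (lt_irrefl _)
          · have hanc : pvIsAnc s t := by
              rw [pvIsAnc_iff_prefix]
              exact ⟨hpre', by simpa using hlen⟩
            exact List.cons_prefix_cons.mpr ⟨rfl, ih hanc hsu hut⟩

-- join/split roundtrip

theorem join_pair (sep : List Char) (xs : List (List Char)) (a b : List Char) :
    PySem.Chars.join sep (xs ++ [a, b]) = PySem.Chars.join sep (xs ++ [a ++ sep ++ b]) := by
  induction xs with
  | nil =>
    simp [PySem.Chars.join_singleton, PySem.Chars.join_cons_cons]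
  | cons x xs ih =>
    cases xs with
    | nil =>
      simp only [List.nil_append, List.cons_append] at *
      simp [PySem.Chars.join_cons_cons, PySem.Chars.join_singleton, List.append_assoc]
    | cons y ys =>
      simp only [List.cons_append] at *
      rw [PySem.Chars.join_cons_cons, PySem.Chars.join_cons_cons, ih]

theorem go_join (sep : List Char) (hsep : sep ≠ []) :
    ∀ (fuel : Nat) (l cur : List Char) (acc : List (List Char)), l.length < fuel →
    PySem.Chars.join sep (PySem.Chars.splitOn.go sep fuel l cur acc)
      = PySem.Chars.join sep (acc.reverse ++ [cur.reverse ++ l]) := by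
  intro fuel
  induction fuel with
  | zero => intro l cur acc h; omega
  | succ fuel ih =>
    intro l cur acc h
    cases l with
    | nil =>
      rw [PySem.Chars.splitOn.go.eq_def]
      simp
    | cons c rest =>
      rw [PySem.Chars.splitOn.go.eq_def]
      simp only []
      by_cases hp : sep.isPrefixOf (c :: rest) = true
      · rw [if_pos hp]
        have hpre : sep <+: (c :: rest) := List.isPrefixOf_iff_prefix.mp hp
        obtain ⟨r, hr⟩ := hpre
        have hslen : 0 < sep.length := List.length_pos_iff.mpr hsep
        have hdrop : List.drop sep.length (c :: rest) = r := by
          rw [← hr]; simp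
        have hrlen : r.length < fuel := by
          have := congrArg List.length hr
          simp at this
          simp at h
          omega
        rw [hdrop, ih r [] (cur.reverse :: acc) hrlen]
        have heq : (cur.reverse :: acc).reverse ++ [List.reverse ([] : List Char) ++ r]
            = acc.reverse ++ [cur.reverse, [] ++ r] := by simp
        rw [heq]
        rw [show acc.reverse ++ [cur.reverse, [] ++ r] = acc.reverse ++ ([cur.reverse] ++ [[] ++ r]) by simp]
        rw [← List.append_assoc]
        rw [show acc.reverse ++ [cur.reverse] ++ [[] ++ r] = acc.reverse ++ [cur.reverse, [] ++ r] by simp]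
        rw [join_pair]
        congr 1
        simp [← hr]
      · rw [if_neg hp]
        rw [ih rest (c :: cur) acc (by simp at h ⊢; omega)]
        simp

theorem join_splitOn (s sep : List Char) (hsep : sep ≠ []) :
    PySem.Chars.join sep (PySem.Chars.splitOn s sep) = s := by
  unfold PySem.Chars.splitOn
  rw [go_join sep hsep _ s [] [] (by omega)]
  simp [PySem.Chars.join_singleton]

theorem splitOn_go_ne_nil (sep : List Char) :
    ∀ (fuel : Nat) (l cur : List Char) (acc : List (List Char)), PySem.Chars.splitOn.go sep fuel l cur acc ≠ [] := by
  intro fuel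
  induction fuel with
  | zero => intro l cur acc; rw [PySem.Chars.splitOn.go.eq_def]; simp
  | succ fuel ih =>
    intro l cur acc
    cases l with
    | nil => rw [PySem.Chars.splitOn.go.eq_def]; simp
    | cons c rest =>
      rw [PySem.Chars.splitOn.go.eq_def]
      simp only []
      by_cases hp : sep.isPrefixOf (c :: rest) = true
      · rw [if_pos hp]; exact ih _ _ _
      · rw [if_neg hp]; exact ih _ _ _

theorem pvSplit_eq (p : String) : pvSplit p = (PySem.Chars.splitOn p.toList ['/']).map String.ofList := by
  unfold pvSplit PySem.Str.split?
  rw [show ("/" : String).toList = ['/'] from rfl]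
  unfold PySem.Chars.split?
  simp

theorem pvJoin_pvSplit (p : String) : pvJoin (pvSplit p) = p := by
  rw [pvSplit_eq]
  unfold pvJoin PySem.Str.join
  rw [show ("/" : String).toList = ['/'] from rfl]
  rw [List.map_map]
  rw [show (String.toList ∘ String.ofList) = id by funext l; simp [String.toList_ofList]]
  rw [List.map_id]
  rw [join_splitOn _ _ (by simp)]
  exact String.ofList_toList

theorem pvSplit_ne_nil (p : String) : pvSplit p ≠ [] := by
  rw [pvSplit_eq]
  unfold PySem.Chars.splitOn
  intro h
  exact splitOn_go_ne_nil ['/'] _ _ _ _ (by simpa using h)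

theorem pvJoin_injOn {k1 k2 : List String} (h1 : ∃ p, k1 = pvSplit p) (h2 : ∃ q, k2 = pvSplit q)
    (h : pvJoin k1 = pvJoin k2) : k1 = k2 := by
  obtain ⟨p, rfl⟩ := h1
  obtain ⟨q, rfl⟩ := h2
  rw [pvJoin_pvSplit, pvJoin_pvSplit] at h
  rw [h]

-- two DecidableLT instances give the same sort
theorem pvSorted_instEq {α κ : Type} [i : LT κ] (d1 d2 : DecidableLT κ) (xs : List α) (key : α → κ) (rev : Bool) :
    @PySem.List.sorted α κ i d1 xs key rev = @PySem.List.sorted α κ i d2 xs key rev := by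
  have : d1 = d2 := by funext a b; exact Subsingleton.elim _ _
  rw [this]

-- keep predicate: t has no strict ancestor in X
def pvKeep (X : List (List String)) (t : List String) : Bool :=
  X.all (fun s => !(decide (s.length < t.length) && (t.take s.length == s)))

theorem pvKeep_iff (X : List (List String)) (t : List String) :
    pvKeep X t = true ↔ ∀ s ∈ X, ¬ pvIsAnc s t := by
  unfold pvKeep pvIsAnc
  simp only [List.all_eq_true, Bool.not_eq_eq_eq_not, Bool.not_true, Bool.and_eq_false_iff,
    decide_eq_false_iff_not, not_lt, beq_eq_false_iff_ne, ne_eq]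
  constructor
  · intro h s hs
    intro ⟨hlt, htake⟩
    rcases h s hs with h1 | h1
    · omega
    · exact h1 htake
  · intro h s hs
    by_cases hlt : s.length < t.length
    · exact Or.inr (fun htake => h s hs ⟨hlt, htake⟩)
    · exact Or.inl (by omega)

-- ===== A-side characterization =====
theorem pvDictA_keys (xs : List String) :
    (pvDictA xs).keys = PySem.Set.ofList (xs.map pvSplit) := by
  unfold pvDictA
  rw [PySem.Dict.keys_foldl_insert_key xs pvSplit (fun _ p => p) PySem.Dict.empty]
  rw [PySem.Dict.keys_empty]
  exact PySem.Set.update_empty _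

theorem pvDictA_val_aux (l : List String) :
    ∀ d : PySem.Dict (List String) String, (∀ kv ∈ d.items, kv.2 = pvJoin kv.1) →
    ∀ kv ∈ (l.foldl (fun d p => d.insert (pvSplit p) p) d).items, kv.2 = pvJoin kv.1 := by
  induction l with
  | nil => intro d hd kv hkv; exact hd kv hkv
  | cons p l ih =>
    intro d hd kv hkv
    refine ih _ ?_ kv hkv
    intro kv' hkv'
    rcases (PySem.Dict.mem_items_insert d (pvSplit p) p kv').mp hkv' with h | ⟨h, _⟩
    · rw [h]
      exact (pvJoin_pvSplit p).symm
    · exact hd kv' h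

theorem pvDictA_items_iff (xs : List String) (kv : List String × String) :
    kv ∈ (pvDictA xs).items ↔ kv.1 ∈ (pvDictA xs).keys ∧ kv.2 = pvJoin kv.1 := by
  constructor
  · intro h
    refine ⟨PySem.Dict.mem_keys_of_mem_items _ h, ?_⟩
    exact pvDictA_val_aux xs PySem.Dict.empty (by simp [PySem.Dict.empty]) kv h
  · rintro ⟨hk, hv⟩
    simp only [PySem.Dict.keys] at hk
    obtain ⟨kv', hkv', h1⟩ := List.mem_map.mp hk
    have hv' : kv'.2 = pvJoin kv'.1 :=
      pvDictA_val_aux xs PySem.Dict.empty (by simp [PySem.Dict.empty]) kv' hkv'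
    have : kv = kv' := by
      cases kv; cases kv'
      simp only at h1 hv hv' ⊢
      subst h1
      rw [hv, hv']
    rw [this]
    exact hkv'

theorem pvOmit_iff (xs : List String) (k : List String) :
    pvOmit (pvDictA xs) k = true ↔ ∃ s ∈ xs.map pvSplit, pvIsAnc s k := by
  unfold pvOmit
  rw [List.any_eq_true]
  constructor
  · rintro ⟨i, hi, hc⟩
    rw [PySem.List.mem_pyRange_one] at hi
    have h0 : (0 : Int) ≤ i := by omega
    rw [PySem.List.slice_to _ h0] at hc
    rw [PySem.Dict.contains_iff_mem_keys, pvDictA_keys, PySem.Set.mem_ofList] at hc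
    refine ⟨k.take i.toNat, hc, ?_⟩
    unfold pvIsAnc
    have hlt : i.toNat < k.length := by omega
    constructor
    · simpa [List.length_take] using hlt
    · rw [List.length_take]
      congr 1
      omega
  · rintro ⟨s, hs, hanc⟩
    obtain ⟨hlen, htake⟩ := hanc
    have hne : s ≠ [] := by
      obtain ⟨p, _, rfl⟩ := List.mem_map.mp hs
      exact pvSplit_ne_nil p
    have hpos : 0 < s.length := List.length_pos_iff.mpr hne
    refine ⟨(s.length : Int), ?_, ?_⟩
    · rw [PySem.List.mem_pyRange_one]
      omega
    · rw [PySem.List.slice_to _ (by omega)]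
      rw [PySem.Dict.contains_iff_mem_keys, pvDictA_keys, PySem.Set.mem_ofList]
      simpa [htake] using hs

theorem pvFoldSet_mem (items : List (List String × String)) (om : List String × String → Bool) :
    ∀ (s : PySem.Set String) (x : String),
    x ∈ (items.foldl (fun rs kv => if om kv then rs else PySem.Set.add rs kv.2) s) ↔
      x ∈ s ∨ ∃ kv ∈ items, om kv = false ∧ x = kv.2 := by
  induction items with
  | nil => simp
  | cons kv items ih =>
    intro s x
    simp only [List.foldl_cons]
    by_cases h : om kv = true
    · rw [if_pos h]
      rw [ih]
      constructor
      · rintro (hx | hx)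
        · exact Or.inl hx
        · right; obtain ⟨kv', h1, h2, h3⟩ := hx; exact ⟨kv', by simp [h1], h2, h3⟩
      · rintro (hx | ⟨kv', h1, h2, h3⟩)
        · exact Or.inl hx
        · rcases List.mem_cons.mp h1 with rfl | h1'
          · rw [h] at h2; exact absurd h2 (by simp)
          · exact Or.inr ⟨kv', h1', h2, h3⟩
    · rw [if_neg h]
      rw [ih]
      rw [PySem.Set.mem_add]
      constructor
      · rintro ((hx | hx) | ⟨kv', h1, h2, h3⟩)
        · exact Or.inl hx
        · exact Or.inr ⟨kv, by simp, by simpa using h, hx⟩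
        · exact Or.inr ⟨kv', by simp [h1], h2, h3⟩
      · rintro (hx | ⟨kv', h1, h2, h3⟩)
        · exact Or.inl (Or.inl hx)
        · rcases List.mem_cons.mp h1 with rfl | h1'
          · exact Or.inl (Or.inr h3)
          · exact Or.inr ⟨kv', h1', h2, h3⟩

theorem pvFoldSet_nodup (items : List (List String × String)) (om : List String × String → Bool) :
    ∀ (s : PySem.Set String), s.Nodup →
    (items.foldl (fun rs kv => if om kv then rs else PySem.Set.add rs kv.2) s).Nodup := by
  induction items with
  | nil => intro s hs; exact hs
  | cons kv items ih =>
    intro s hs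
    simp only [List.foldl_cons]
    by_cases h : om kv = true
    · rw [if_pos h]; exact ih s hs
    · rw [if_neg h]; exact ih _ (PySem.Set.nodup_add s kv.2 hs)

-- ===== B-side scan characterization =====
theorem pvPairwise_getLast {r : List String → List String → Prop} :
    ∀ (l : List (List String)) (x y : List String), l.Pairwise r → x ∈ l → l.getLast? = some y →
    x = y ∨ r x y := by
  intro l
  induction l with
  | nil => intro x y _ hx; simp at hx
  | cons a l ih =>
    intro x y hp hx hl
    rcases List.pairwise_cons.mp hp with ⟨ha, hp'⟩
    cases l with
    | nil =>
      simp at hl hx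
      subst hl; subst hx; exact Or.inl rfl
    | cons b l' =>
      rw [List.getLast?_cons_cons] at hl
      rcases List.mem_cons.mp hx with rfl | hx'
      · right
        have : y ∈ b :: l' := by
          have := List.mem_of_getLast? (l := b :: l') (a := y) hl
          exact this
        exact ha y this
      · exact ih x y hp' hx' hl

theorem pvMem_done_of_anc {T done rest : List (List String)} {t s : List String}
    (hT : T.Pairwise (· < ·)) (hsplit : T = done ++ t :: rest)
    (hs : s ∈ T) (hanc : pvIsAnc s t) : s ∈ done := by
  subst hsplit
  have hlt : s < t := pvLt_of_isAnc hanc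
  rcases List.mem_append.mp hs with h | h
  · exact h
  · rcases List.mem_cons.mp h with rfl | h'
    · exact absurd hlt (lt_irrefl _)
    · exfalso
      rcases List.pairwise_append.mp hT with ⟨_, hp2, _⟩
      rcases List.pairwise_cons.mp hp2 with ⟨ht, _⟩
      exact absurd hlt (lt_asymm (ht s h'))

theorem pvExists_minimal {T done rest : List (List String)} {t : List String}
    (hT : T.Pairwise (· < ·)) (hsplit : T = done ++ t :: rest)
    (hanc : ∃ s ∈ T, pvIsAnc s t) :
    ∃ s0 ∈ done, pvIsAnc s0 t ∧ ∀ u ∈ T, ¬ pvIsAnc u s0 := by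
  obtain ⟨s, hs, hst⟩ := hanc
  have key : ∀ (n : Nat) (s : List String), s ∈ T → pvIsAnc s t → s.length ≤ n →
      ∃ s0 ∈ done, pvIsAnc s0 t ∧ ∀ u ∈ T, ¬ pvIsAnc u s0 := by
    intro n
    induction n with
    | zero =>
      intro s hs hst hlen
      refine ⟨s, pvMem_done_of_anc hT hsplit hs hst, hst, ?_⟩
      intro u hu hanc'
      have := hanc'.1
      omega
    | succ n ih =>
      intro s hs hst hlen
      by_cases hmin : ∃ u ∈ T, pvIsAnc u s
      · obtain ⟨u, hu, hus⟩ := hmin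
        exact ih u hu (pvIsAnc_trans hus hst) (by have := hus.1; omega)
      · exact ⟨s, pvMem_done_of_anc hT hsplit hs hst, hst,
          fun u hu hanc' => hmin ⟨u, hu, hanc'⟩⟩
  exact key s.length s hs hst le_rfl

theorem pvKey_iff {T done rest : List (List String)} {t : List String}
    (hT : T.Pairwise (· < ·)) (hsplit : T = done ++ t :: rest) :
    (∃ s ∈ T, pvIsAnc s t) ↔
      (∃ l, (done.filter (pvKeep T)).getLast? = some l ∧ pvIsAnc l t) := by
  constructor
  · intro hanc
    obtain ⟨s0, hs0d, hs0t, hs0min⟩ := pvExists_minimal hT hsplit hanc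
    have hs0F : s0 ∈ done.filter (pvKeep T) := by
      rw [List.mem_filter]
      exact ⟨hs0d, (pvKeep_iff T s0).mpr (fun u hu => hs0min u hu)⟩
    have hFne : done.filter (pvKeep T) ≠ [] := by
      intro h; rw [h] at hs0F; simp at hs0F
    obtain ⟨l, hl⟩ := Option.isSome_iff_exists.mp (by
      rw [List.getLast?_isSome]; exact hFne)
    refine ⟨l, hl, ?_⟩
    have hlF : l ∈ done.filter (pvKeep T) := List.mem_of_getLast? hl
    have hld : l ∈ done := (List.mem_filter.mp hlF).1
    have hdonePW : done.Pairwise (· < ·) := by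
      subst hsplit; exact (List.pairwise_append.mp hT).1
    have hFPW : (done.filter (pvKeep T)).Pairwise (· < ·) := hdonePW.filter _
    rcases pvPairwise_getLast _ s0 l hFPW hs0F hl with rfl | hlt
    · exact hs0t
    · -- s0 < l < t and s0 ancestor of t: then s0 is an ancestor of l, contradicting pvKeep T l
      exfalso
      have hlt2 : l < t := by
        subst hsplit
        rcases List.pairwise_append.mp hT with ⟨_, _, hcross⟩
        exact hcross l hld t (by simp)
      have hpre : s0 <+: l := pvInterval hs0t hlt hlt2
      have hanc0 : pvIsAnc s0 l := by
        rw [pvIsAnc_iff_prefix]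
        refine ⟨hpre, ?_⟩
        have hle := hpre.length_le
        rcases lt_or_eq_of_le hle with h | h
        · exact h
        · exact absurd (hpre.eq_of_length h) (by intro he; rw [he] at hlt; exact lt_irrefl _ hlt)
      have hkeepl : pvKeep T l = true := (List.mem_filter.mp hlF).2
      rw [pvKeep_iff] at hkeepl
      exact hkeepl s0 (by subst hsplit; exact List.mem_append.mpr (Or.inl (List.mem_filter.mp hs0F).1)) hanc0
  · rintro ⟨l, hl, hanc⟩
    have hlF : l ∈ done.filter (pvKeep T) := List.mem_of_getLast? hl
    have hld : l ∈ done := (List.mem_filter.mp hlF).1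
    exact ⟨l, by subst hsplit; exact List.mem_append.mpr (Or.inl hld), hanc⟩

theorem pvScan_spec (T : List (List String)) (hT : T.Pairwise (· < ·)) :
    ∀ (L done : List (List String)), T = done ++ L →
    L.foldl pvStep ((done.filter (pvKeep T)).map pvJoin, (done.filter (pvKeep T)).getLast?)
      = ((T.filter (pvKeep T)).map pvJoin, (T.filter (pvKeep T)).getLast?) := by
  intro L
  induction L with
  | nil =>
    intro done hdone
    simp only [List.foldl_nil]
    rw [hdone, List.append_nil]
  | cons t rest ih =>
    intro done hdone
    rw [List.foldl_cons]
    by_cases hanc : ∃ s ∈ T, pvIsAnc s t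
    · obtain ⟨l, hl, hanc_l⟩ := (pvKey_iff hT hdone).mp hanc
      have hstep : pvStep ((done.filter (pvKeep T)).map pvJoin, (done.filter (pvKeep T)).getLast?) t
          = ((done.filter (pvKeep T)).map pvJoin, (done.filter (pvKeep T)).getLast?) := by
        unfold pvStep
        simp only [hl]
        split_ifs with h
        · rfl
        · exact absurd hanc_l h
      rw [hstep]
      have hkeepf : pvKeep T t = false := by
        rw [Bool.eq_false_iff]
        intro hk
        rw [pvKeep_iff] at hk
        obtain ⟨s, hs, hanc_s⟩ := hanc
        exact hk s hs hanc_s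
      have hfilter : (done ++ [t]).filter (pvKeep T) = done.filter (pvKeep T) := by
        rw [List.filter_append]
        simp [hkeepf]
      have := ih (done ++ [t]) (by rw [hdone]; simp)
      rw [← hfilter]
      exact this
    · have hkeept : pvKeep T t = true := by
        rw [pvKeep_iff]
        intro s hs hanc_s
        exact hanc ⟨s, hs, hanc_s⟩
      have hstep : pvStep ((done.filter (pvKeep T)).map pvJoin, (done.filter (pvKeep T)).getLast?) t
          = ((done.filter (pvKeep T)).map pvJoin ++ [pvJoin t], some t) := by
        unfold pvStep
        cases hcase : (done.filter (pvKeep T)).getLast? with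
        | none => rfl
        | some l =>
          simp only []
          rw [if_neg]
          intro hcond
          exact hanc ((pvKey_iff hT hdone).mpr ⟨l, hcase, hcond⟩)
      rw [hstep]
      have hfilter : (done ++ [t]).filter (pvKeep T) = done.filter (pvKeep T) ++ [t] := by
        rw [List.filter_append]
        simp [hkeept]
      have := ih (done ++ [t]) (by rw [hdone]; simp)
      rw [hfilter] at this
      rw [← this]
      rw [List.map_append, List.getLast?_concat]
      simp

-- ===== final assembly =====
def pvResultSet (xs : List String) : PySem.Set String :=
  (pvDictA xs).items.foldl
    (fun rs kv => if pvOmit (pvDictA xs) kv.1 then rs else PySem.Set.add rs kv.2) PySem.Set.empty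

theorem pvA_eq (xs : List String) :
    PruneSubdirectories xs = PySem.List.sorted (pvResultSet xs) (fun x => x) := rfl

def pvT (xs : List String) : List (List String) :=
  PySem.List.sorted (PySem.Set.ofList (xs.map pvSplit)) (fun x => x)

theorem pvT_pairwise (xs : List String) : (pvT xs).Pairwise (· < ·) := by
  unfold pvT
  rw [pvSorted_instEq _ (LinearOrder.toDecidableLT (α := List String))]
  exact PySem.List.sorted_ofList_pairwise_lt (xs.map pvSplit)

theorem pvT_nodup (xs : List String) : (pvT xs).Nodup := by
  unfold pvT
  exact ((PySem.List.sorted_perm _ _ _).symm).nodup (PySem.Set.nodup_ofList _)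

theorem pvT_mem (xs : List String) (k : List String) : k ∈ pvT xs ↔ k ∈ xs.map pvSplit := by
  unfold pvT
  rw [PySem.List.mem_sorted, PySem.Set.mem_ofList]

theorem pvB_eq (xs : List String) :
    PruneSubdirectories_alt xs
      = PySem.List.sorted (((pvT xs).filter (pvKeep (pvT xs))).map pvJoin) (fun x => x) := by
  unfold PruneSubdirectories_alt
  show PySem.List.sorted ((pvT xs).foldl pvStep ([], none)).1 (fun x => x) = _
  have h := pvScan_spec (pvT xs) (pvT_pairwise xs) (pvT xs) [] rfl
  simp only [List.filter_nil, List.map_nil, List.getLast?_nil] at h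
  rw [h]

theorem pvA_mem (xs : List String) (x : String) :
    x ∈ pvResultSet xs ↔
      ∃ k, k ∈ xs.map pvSplit ∧ (∀ s ∈ xs.map pvSplit, ¬ pvIsAnc s k) ∧ x = pvJoin k := by
  unfold pvResultSet
  rw [pvFoldSet_mem]
  constructor
  · rintro (hx | ⟨kv, hkv, hom, hx⟩)
    · simp [PySem.Set.empty] at hx
    · obtain ⟨hk, hv⟩ := (pvDictA_items_iff xs kv).mp hkv
      rw [pvDictA_keys, PySem.Set.mem_ofList] at hk
      refine ⟨kv.1, hk, ?_, by rw [hx, hv]⟩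
      intro s hs hanc
      have := (pvOmit_iff xs kv.1).mpr ⟨s, hs, hanc⟩
      rw [this] at hom
      exact absurd hom (by simp)
  · rintro ⟨k, hk, hnoanc, hx⟩
    right
    refine ⟨(k, pvJoin k), ?_, ?_, by simpa using hx⟩
    · rw [pvDictA_items_iff]
      exact ⟨by rw [pvDictA_keys, PySem.Set.mem_ofList]; exact hk, rfl⟩
    · rw [Bool.eq_false_iff]
      intro hom
      obtain ⟨s, hs, hanc⟩ := (pvOmit_iff xs k).mp hom
      exact hnoanc s hs hanc

theorem pvA_nodup (xs : List String) : (pvResultSet xs).Nodup := by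
  unfold pvResultSet
  exact pvFoldSet_nodup _ _ _ (by simp [PySem.Set.empty])

theorem pvB_mem (xs : List String) (x : String) :
    x ∈ ((pvT xs).filter (pvKeep (pvT xs))).map pvJoin ↔
      ∃ k, k ∈ xs.map pvSplit ∧ (∀ s ∈ xs.map pvSplit, ¬ pvIsAnc s k) ∧ x = pvJoin k := by
  rw [List.mem_map]
  constructor
  · rintro ⟨k, hk, hx⟩
    obtain ⟨hkT, hkeep⟩ := List.mem_filter.mp hk
    rw [pvKeep_iff] at hkeep
    refine ⟨k, (pvT_mem xs k).mp hkT, ?_, hx.symm⟩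
    intro s hs
    exact hkeep s ((pvT_mem xs s).mpr hs)
  · rintro ⟨k, hk, hnoanc, hx⟩
    refine ⟨k, List.mem_filter.mpr ⟨(pvT_mem xs k).mpr hk, ?_⟩, hx.symm⟩
    rw [pvKeep_iff]
    intro s hs
    exact hnoanc s ((pvT_mem xs s).mp hs)

theorem pvB_nodup (xs : List String) : (((pvT xs).filter (pvKeep (pvT xs))).map pvJoin).Nodup := by
  apply List.Nodup.map_on
  · intro k1 hk1 k2 hk2 hj
    have h1 : k1 ∈ xs.map pvSplit := (pvT_mem xs k1).mp (List.mem_filter.mp hk1).1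
    have h2 : k2 ∈ xs.map pvSplit := (pvT_mem xs k2).mp (List.mem_filter.mp hk2).1
    obtain ⟨p, _, hp⟩ := List.mem_map.mp h1
    obtain ⟨q, _, hq⟩ := List.mem_map.mp h2
    exact pvJoin_injOn ⟨p, hp.symm⟩ ⟨q, hq.symm⟩ hj
  · exact (pvT_nodup xs).filter _

-- ===== VERDICT (by name: the statement is the Claim_ definition above) =====
theorem PruneSubdirectories_spec : Claim_equal_PruneSubdirectories := by
  intro xs _
  unfold Spec_PruneSubdirectories
  rw [pvA_eq xs, pvB_eq xs]
  rw [pvSorted_instEq _ (LinearOrder.toDecidableLT (α := String))]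
  rw [pvSorted_instEq _ (LinearOrder.toDecidableLT (α := String)) (xs := ((pvT xs).filter (pvKeep (pvT xs))).map pvJoin)]
  apply (PySem.List.sorted_id_eq_sorted_id_iff_perm _ _).mpr
  apply (List.perm_ext_iff_of_nodup (pvA_nodup xs) (pvB_nodup xs)).mpr
  intro x
  rw [pvA_mem, pvB_mem]
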